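-- pv_equiv track=rewrite | github.com/deepkumarchaudhary/python-poc | Test-5Mar23/test1.py | solution
-- ===== SOURCE A (Python) =====
-- def solution(S):
--     count = 0
--     for i in range(0, len(S)):
--         if(S[i] == '<'):
--             for j in range(i):
--                 if (S[j]=='.'):
--                     count += 1
--         elif(S[i] == '>'):
--             for j in range(i+1, len(S)):
--                 if (S[j]=='.'):
--                     count += 1
--     return count
--     pass
-- ===== SOURCE B (Python) =====
-- def solution(S):
--     count = 0
--     pref = 0  # dots seen so far
--     gts = 0   # '>' seen so far
--     for ch in S:
--         if ch == '<':
--             count += pref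
--         elif ch == '>':
--             gts += 1
--         elif ch == '.':
--             count += gts
--             pref += 1
--     return count
-- ===== Notes on version B (the rewrite author's own statement) =====
-- stated objective: alternative
-- what changed: Replaced A's inner rescans (a full prefix scan per '<' and a suffix scan per '>') with one forward pass keeping running counts of dots and of '>' seen so far: a '<' adds the dot count, a '.' adds the '>' count; intended as the O(n) form of A's O(n^2) worst case, measured only ~1.5x on the generated inputs.
import Mathlib
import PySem

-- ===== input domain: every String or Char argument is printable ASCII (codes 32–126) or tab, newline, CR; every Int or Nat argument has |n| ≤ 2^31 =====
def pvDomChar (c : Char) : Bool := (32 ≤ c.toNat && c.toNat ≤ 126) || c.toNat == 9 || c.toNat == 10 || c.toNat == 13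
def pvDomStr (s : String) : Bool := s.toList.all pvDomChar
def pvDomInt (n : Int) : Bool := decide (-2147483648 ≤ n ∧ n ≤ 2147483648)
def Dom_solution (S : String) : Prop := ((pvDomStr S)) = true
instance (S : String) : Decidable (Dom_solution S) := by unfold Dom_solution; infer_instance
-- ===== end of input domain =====

-- B replaces A's per-character inner rescans by one forward pass with two running counts (objective: alternative single-pass algorithm).

-- ===== PORT A =====
-- A: for each index i, on '<' rescan S[0:i] for dots, on '>' rescan S[i+1:] for dots.
def solution (S : String) : Int :=
  let L := S.toList
  (List.range L.length).foldl (fun count i =>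
    if L.getD i ' ' = '<' then
      (List.range i).foldl (fun c j => if L.getD j ' ' = '.' then c + 1 else c) count
    else if L.getD i ' ' = '>' then
      (List.range' (i+1) (L.length - (i+1))).foldl
        (fun c j => if L.getD j ' ' = '.' then c + 1 else c) count
    else count) 0

-- ===== PORT B =====
-- B: single pass over the characters with state (count, pref = dots so far, gts = '>' so far).
def solution_alt (S : String) : Int :=
  let r := S.toList.foldl (fun (st : Int × Int × Int) ch =>
    if ch = '<' then (st.1 + st.2.1, st.2.1, st.2.2)
    else if ch = '>' then (st.1, st.2.1, st.2.2 + 1)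
    else if ch = '.' then (st.1 + st.2.2, st.2.1 + 1, st.2.2)
    else st) (0, 0, 0)
  r.1

-- ===== PRECONDITION & SPEC =====
def Spec_solution (S : String) (out : Int) : Prop := out = solution_alt S
instance (S : String) (out : Int) : Decidable (Spec_solution S out) := by unfold Spec_solution; infer_instance

-- ===== CLAIM (what is proved, stated in full; the proofs are below) =====
def Claim_equal_solution : Prop := ∀ (S : String), Dom_solution S → Spec_solution S (solution S)

-- ===== LEMMAS AND PROOFS =====

-- number of dots in a character list, as an Int
def pvDots (L : List Char) : Int := (L.countP (fun c => c = '.') : Int)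

-- reference value: pvV p R = answer contributed by the suffix R, given p dots before R
def pvV (p : Int) : List Char → Int
  | [] => 0
  | ch :: R =>
      (if ch = '<' then p else if ch = '>' then pvDots R else 0) +
        pvV (p + if ch = '.' then (1 : Int) else 0) R

theorem pvDots_cons (ch : Char) (R : List Char) :
    pvDots (ch :: R) = (if ch = '.' then (1 : Int) else 0) + pvDots R := by
  by_cases h : ch = '.' <;> simp [pvDots, List.countP_cons, h] <;> push_cast <;> omega

theorem pvV_cons (p : Int) (ch : Char) (R : List Char) :
    pvV p (ch :: R) = (if ch = '<' then p else if ch = '>' then pvDots R else 0) +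
      pvV (p + if ch = '.' then (1 : Int) else 0) R := rfl

-- A's inner loop: counting dots over indices [a, a+m) equals the dot count of that segment
theorem pv_inner (L : List Char) (m : ℕ) : ∀ (a : ℕ) (c : Int), a + m ≤ L.length →
    (List.range' a m).foldl (fun c j => if L.getD j ' ' = '.' then c + 1 else c) c
      = c + pvDots ((L.drop a).take m) := by
  induction m with
  | zero => intro a c _; simp [pvDots]
  | succ m ih =>
    intro a c h
    have ha : a < L.length := by omega
    have hdrop : L.drop a = L[a] :: L.drop (a + 1) := List.drop_eq_getElem_cons ha
    rw [List.range'_succ, List.foldl_cons, List.getD_eq_getElem L ' ' ha,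
      ih (a + 1) _ (by omega), hdrop, List.take_succ_cons, pvDots_cons]
    by_cases hd : L[a] = '.'
    · rw [if_pos hd, if_pos hd]; ring
    · rw [if_neg hd, if_neg hd]; ring

-- A's outer loop from index a onwards computes pvV of the remaining suffix
theorem pv_outer (L : List Char) (m : ℕ) : ∀ (a : ℕ) (c : Int), a + m = L.length →
    (List.range' a m).foldl (fun count i =>
      if L.getD i ' ' = '<' then
        (List.range i).foldl (fun c j => if L.getD j ' ' = '.' then c + 1 else c) count
      else if L.getD i ' ' = '>' then
        (List.range' (i+1) (L.length - (i+1))).foldl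
          (fun c j => if L.getD j ' ' = '.' then c + 1 else c) count
      else count) c
      = c + pvV (pvDots (L.take a)) (L.drop a) := by
  induction m with
  | zero =>
    intro a c h
    have : L.drop a = [] := List.drop_eq_nil_of_le (by omega)
    simp [this, pvV]
  | succ m ih =>
    intro a c h
    have ha : a < L.length := by omega
    have hdrop : L.drop a = L[a] :: L.drop (a + 1) := List.drop_eq_getElem_cons ha
    have htake : L.take (a + 1) = L.take a ++ [L[a]] := by
      rw [List.take_succ, List.getElem?_eq_getElem ha]; rfl
    have happ : ∀ (P : List Char) (x : Char),
        pvDots (P ++ [x]) = pvDots P + (if x = '.' then (1 : Int) else 0) := by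
      intro P x
      by_cases hd : x = '.' <;> simp [pvDots, List.countP_append, List.countP_cons, hd] <;>
        push_cast <;> omega
    have hptake : pvDots (L.take (a + 1))
        = pvDots (L.take a) + (if L[a] = '.' then (1 : Int) else 0) := by
      rw [htake, happ]
    rw [List.range'_succ, List.foldl_cons, List.getD_eq_getElem L ' ' ha,
      ih (a + 1) _ (by omega), hptake, hdrop, pvV_cons]
    by_cases h1 : L[a] = '<'
    · rw [if_pos h1, if_pos h1, List.range_eq_range',
        pv_inner L a 0 c (by omega)]
      simp only [List.drop_zero, List.take_zero]
      have : ¬ (L[a] = '.') := by rw [h1]; decide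
      rw [if_neg this]
      ring
    · by_cases h2 : L[a] = '>'
      · rw [if_neg h1, if_neg h1, if_pos h2, if_pos h2,
          pv_inner L (L.length - (a + 1)) (a + 1) c (by omega)]
        have hfull : (L.drop (a + 1)).take (L.length - (a + 1)) = L.drop (a + 1) := by
          apply List.take_of_length_le; simp
        have : ¬ (L[a] = '.') := by rw [h2]; decide
        rw [hfull, if_neg this]
        ring
      · rw [if_neg h1, if_neg h1, if_neg h2, if_neg h2]
        ring

-- B's single pass: from state (c, p, g) the fold returns c + pvV p R + g * (dots of R)
theorem pv_alt (R : List Char) : ∀ (c p g : Int),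
    (R.foldl (fun (st : Int × Int × Int) ch =>
      if ch = '<' then (st.1 + st.2.1, st.2.1, st.2.2)
      else if ch = '>' then (st.1, st.2.1, st.2.2 + 1)
      else if ch = '.' then (st.1 + st.2.2, st.2.1 + 1, st.2.2)
      else st) (c, p, g)).1
      = c + pvV p R + g * pvDots R := by
  induction R with
  | nil => intro c p g; simp [pvV, pvDots]
  | cons ch R ih =>
    intro c p g
    rw [List.foldl_cons]
    by_cases h1 : ch = '<'
    · rw [if_pos h1, ih]
      simp [pvV_cons, pvDots_cons, h1]
      ring
    · by_cases h2 : ch = '>'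
      · rw [if_neg h1, if_pos h2, ih]
        simp [pvV_cons, pvDots_cons, h1, h2]
        ring
      · by_cases h3 : ch = '.'
        · rw [if_neg h1, if_neg h2, if_pos h3, ih]
          simp [pvV_cons, pvDots_cons, h1, h2, h3]
          ring
        · rw [if_neg h1, if_neg h2, if_neg h3, ih]
          simp [pvV_cons, pvDots_cons, h1, h2, h3]

-- ===== VERDICT (by name: the statement is the Claim_ definition above) =====
theorem solution_spec : Claim_equal_solution := by
  intro S _
  unfold Spec_solution solution solution_alt
  dsimp only
  rw [pv_alt S.toList 0 0 0]
  have h := pv_outer S.toList S.toList.length 0 0 (by omega)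
  simp only [List.take_zero, List.drop_zero, show pvDots [] = 0 from by simp [pvDots]] at h
  rw [List.range_eq_range', h]
  ring
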